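-- pv_equiv track=rewrite | github.com/flpfraga/classificador_automatico_relatorio_erro | classificador/analise.py | problema_esta_na_arvore
-- ===== SOURCE A (Python) =====
-- def problema_esta_na_arvore(arvore, problema, cont_1, caminho):#função que vai percorrendo o vetor árvore até atingir um nó folhas
--
--     if cont_1 < len(arvore):
--         termo = arvore[cont_1]
--         caminho.append(termo)
--
--         if termo =='0':
--             return 0
--
--         elif termo=='SIM':
--             return 1
--
--         else:
--
--             if termo in problema:
--                 cont_1 = (cont_1*2)+ 1
--                 return problema_esta_na_arvore(arvore, problema, cont_1, caminho)
--
--             else: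
--                 cont_1 = (cont_1*2)+ 2
--                 return problema_esta_na_arvore(arvore, problema, cont_1, caminho)
--
--     else:
--
--         return 0
-- ===== SOURCE B (Python) =====
-- def problema_esta_na_arvore(arvore, problema, cont_1, caminho):
--     # Iterative (while-loop) walk down the array-encoded decision tree; mutates
--     # caminho exactly as A does for non-negative indices.
--     n = len(arvore)
--     while 0 <= cont_1 < n:
--         termo = arvore[cont_1]
--         caminho.append(termo)
--         if termo == '0':
--             return 0
--         if termo == 'SIM':
--             return 1
--         cont_1 = 2 * cont_1 + (1 if termo in problema else 2)
--     return 0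
-- ===== Notes on version B (the rewrite author's own statement) =====
-- stated objective: idiomatic
-- what changed: Replaced A's tail recursion (one stack frame per tree level) by an explicit bounds-checked while loop over the array index.
-- outside the precondition, e.g. on problema_esta_na_arvore(['SIM'], '', -1, []): A returns 1, B returns 0
import Mathlib
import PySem

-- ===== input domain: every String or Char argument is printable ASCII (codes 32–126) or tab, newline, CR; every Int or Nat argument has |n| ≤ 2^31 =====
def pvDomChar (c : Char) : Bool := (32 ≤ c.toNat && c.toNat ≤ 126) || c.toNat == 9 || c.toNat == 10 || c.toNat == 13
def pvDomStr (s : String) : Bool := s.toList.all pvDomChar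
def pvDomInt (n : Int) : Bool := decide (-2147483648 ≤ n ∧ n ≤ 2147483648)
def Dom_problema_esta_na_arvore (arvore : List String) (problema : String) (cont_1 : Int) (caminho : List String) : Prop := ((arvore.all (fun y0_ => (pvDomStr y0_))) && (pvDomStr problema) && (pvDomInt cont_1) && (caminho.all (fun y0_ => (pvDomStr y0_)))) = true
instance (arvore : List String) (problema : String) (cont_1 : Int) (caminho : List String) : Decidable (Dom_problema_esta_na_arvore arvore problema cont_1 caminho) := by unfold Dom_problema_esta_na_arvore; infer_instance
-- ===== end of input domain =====

-- B replaces A's tail recursion by an explicit bounds-checked while loop (fuel-based in Lean);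
-- both mutate 'caminho' identically on Pre_ — the equivalence proved is about the return value.


-- ===== PORT A =====
-- A's recursion: '0 ≤ cont_1' in the guard is a totality guard only (Pre_ guarantees it;
-- Python's check is just 'cont_1 < len(arvore)').
def problema_esta_na_arvore (arvore : List String) (problema : String) (cont_1 : Int) (caminho : List String) : Int :=
  if h : 0 ≤ cont_1 ∧ cont_1 < (arvore.length : Int) then
    let termo := PySem.List.pyGetD arvore cont_1 ""
    let caminho' := caminho ++ [termo]
    if termo == "0" then 0
    else if termo == "SIM" then 1
    else if PySem.Str.isIn termo problema then
      problema_esta_na_arvore arvore problema (cont_1 * 2 + 1) caminho'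
    else
      problema_esta_na_arvore arvore problema (cont_1 * 2 + 2) caminho'
  else 0
termination_by (arvore.length - cont_1.toNat)
decreasing_by all_goals omega

-- ===== PORT B =====
-- The while loop of Source B; fuel = arvore.length is a totality device only (the index at least
-- doubles+1 each iteration, so arvore.length iterations always suffice).
def pvAltGo (arvore : List String) (problema : String) : Nat → Int → Int
  | 0, _ => 0
  | fuel + 1, c =>
    if 0 ≤ c ∧ c < (arvore.length : Int) then
      let termo := PySem.List.pyGetD arvore c ""
      if termo == "0" then 0
      else if termo == "SIM" then 1
      else pvAltGo arvore problema fuel (2 * c + (if PySem.Str.isIn termo problema then 1 else 2))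
    else 0

def problema_esta_na_arvore_alt (arvore : List String) (problema : String) (cont_1 : Int) (caminho : List String) : Int :=
  pvAltGo arvore problema arvore.length cont_1

-- ===== PRECONDITION & SPEC =====
-- Pre_ excludes negative cont_1: there A relies on Python's accidental negative-index
-- wraparound (and raises IndexError/RecursionError on most such inputs), while B's
-- bounds-checked loop naturally returns 0.
def Pre_problema_esta_na_arvore (arvore : List String) (problema : String) (cont_1 : Int) (caminho : List String) : Prop := 0 ≤ cont_1
instance (arvore : List String) (problema : String) (cont_1 : Int) (caminho : List String) : Decidable (Pre_problema_esta_na_arvore arvore problema cont_1 caminho) := by unfold Pre_problema_esta_na_arvore; infer_instance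

def pvWitness_problema_esta_na_arvore : List String × String × Int × List String := (["a", "0", "SIM"], "a", 0, [])

def Spec_problema_esta_na_arvore (arvore : List String) (problema : String) (cont_1 : Int) (caminho : List String) (out : Int) : Prop := out = problema_esta_na_arvore_alt arvore problema cont_1 caminho
instance (arvore : List String) (problema : String) (cont_1 : Int) (caminho : List String) (out : Int) : Decidable (Spec_problema_esta_na_arvore arvore problema cont_1 caminho out) := by unfold Spec_problema_esta_na_arvore; infer_instance

-- ===== CLAIM (what is proved, stated in full; the proofs are below) =====
def Claim_equal_problema_esta_na_arvore : Prop := ∀ (arvore : List String) (problema : String) (cont_1 : Int) (caminho : List String), Dom_problema_esta_na_arvore arvore problema cont_1 caminho → Pre_problema_esta_na_arvore arvore problema cont_1 caminho → Spec_problema_esta_na_arvore arvore problema cont_1 caminho (problema_esta_na_arvore arvore problema cont_1 caminho)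

-- ===== LEMMAS AND PROOFS =====

-- The fuel-driven loop computes A's recursion whenever the fuel covers the remaining depth.
theorem pvAltGo_eq_A (arvore : List String) (problema : String) :
    ∀ (fuel : Nat) (c : Int) (caminho : List String), 0 ≤ c →
      arvore.length ≤ fuel + c.toNat →
      pvAltGo arvore problema fuel c = problema_esta_na_arvore arvore problema c caminho := by
  intro fuel
  induction fuel with
  | zero =>
    intro c caminho hc hfu
    rw [problema_esta_na_arvore, dif_neg (by omega)]
    rfl
  | succ fuel ih =>
    intro c caminho hc hfu
    rw [problema_esta_na_arvore, pvAltGo]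
    by_cases h : 0 ≤ c ∧ c < (arvore.length : Int)
    · rw [dif_pos h, if_pos h]
      by_cases h0 : PySem.List.pyGetD arvore c "" == "0"
      · simp [h0]
      · by_cases h1 : PySem.List.pyGetD arvore c "" == "SIM"
        · simp [h0, h1]
        · simp only [h0, h1, if_false, Bool.false_eq_true]
          by_cases hin : PySem.Str.isIn (PySem.List.pyGetD arvore c "") problema
          · simp only [hin, if_pos]
            have : 2 * c + 1 = c * 2 + 1 := by ring
            rw [this]
            exact ih (c * 2 + 1) _ (by omega) (by omega)
          · simp only [hin, Bool.false_eq_true, if_false]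
            have : 2 * c + 2 = c * 2 + 2 := by ring
            rw [this]
            exact ih (c * 2 + 2) _ (by omega) (by omega)
    · rw [dif_neg h, if_neg h]

-- ===== VERDICT (by name: the statement is the Claim_ definition above) =====
theorem problema_esta_na_arvore_spec : Claim_equal_problema_esta_na_arvore := by
  intro arvore problema cont_1 caminho _hDom hPre
  unfold Spec_problema_esta_na_arvore problema_esta_na_arvore_alt
  exact (pvAltGo_eq_A arvore problema arvore.length cont_1 caminho hPre (by omega)).symm
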